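-- pv_equiv track=rewrite | github.com/KRISgardian/SpeachRecognition | data.py | getNormalizedNumberFromList
-- ===== SOURCE A (Python) =====
-- def getNormalizedNumberFromList(number : list):
--     # Getting number length. -1 for working with indexes.
--     numberLength = len(number) - 1
--
--     # Getting one  normalized number.
--
--     # Normalized number.
--     normalizedNumber = 0
--
--     # First counter entry.
--     firstCounter = numberLength
--
--     # Second counter entry.
--     secondCounter = 0
--
--     # Reversing list.
--     number.reverse()
--
--     # Main convertion loop.
--     while secondCounter != firstCounter + 1:
--         normalizedNumber += int(2 ** secondCounter) * int(number[secondCounter])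
--         secondCounter += 1
--
--
--     # Return value.
--     return normalizedNumber
-- ===== SOURCE B (Python) =====
-- def getNormalizedNumberFromList(number : list):
--     # Keep A's observable side effect: the list is reversed in place.
--     number.reverse()
--     # Horner's method over the bits in original (most-significant-first) order:
--     # iterating the reversed list backwards visits the original order.
--     result = 0
--     for bit in reversed(number):
--         result = result * 2 + int(bit)
--     return result
-- ===== Notes on version B (the rewrite author's own statement) =====
-- stated objective: faster
-- what changed: Replaces the index-counter while loop that sums int(2**i)*bit over the reversed list with Horner's method (result = result*2 + bit) over the bits in original order, computing no powers of two.
import Mathlib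
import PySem

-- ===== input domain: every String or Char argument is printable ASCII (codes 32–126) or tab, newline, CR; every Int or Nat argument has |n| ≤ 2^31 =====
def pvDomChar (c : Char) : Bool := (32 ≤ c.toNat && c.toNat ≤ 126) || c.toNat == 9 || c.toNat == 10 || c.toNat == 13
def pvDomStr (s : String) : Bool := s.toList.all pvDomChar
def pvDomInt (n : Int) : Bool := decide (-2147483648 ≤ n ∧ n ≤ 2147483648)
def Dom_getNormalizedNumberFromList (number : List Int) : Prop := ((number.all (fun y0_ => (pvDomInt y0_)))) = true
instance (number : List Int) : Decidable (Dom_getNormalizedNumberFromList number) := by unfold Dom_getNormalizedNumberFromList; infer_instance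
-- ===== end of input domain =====

-- B replaces A's power-of-two index sum with Horner's method over the bits in original
-- order (objective: simpler). Both Pythons reverse the argument list in place; the
-- equivalence proved here is about the return value (the mutation is identical anyway).

-- ===== PORT A =====
-- while loop over secondCounter = 0 .. firstCounter, summing int(2**i) * number[i]
-- after the in-place reverse; ported as a fold over range(0, numberLength+1).
def getNormalizedNumberFromList (number : List Int) : Int :=
  let numberLength : Int := (number.length : Int) - 1
  let rev := number.reverse
  (PySem.List.pyRange 0 (numberLength + 1) 1).foldl
    (fun normalizedNumber i => normalizedNumber + 2 ^ i.toNat * PySem.List.pyGetD rev i 0) 0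

-- ===== PORT B =====
-- number.reverse(); then Horner over reversed(number) (= the original order).
def getNormalizedNumberFromList_alt (number : List Int) : Int :=
  let rev := number.reverse
  rev.reverse.foldl (fun result bit => result * 2 + bit) 0

-- ===== PRECONDITION & SPEC =====
def Spec_getNormalizedNumberFromList (number : List Int) (out : Int) : Prop := out = getNormalizedNumberFromList_alt number
instance (number : List Int) (out : Int) : Decidable (Spec_getNormalizedNumberFromList number out) := by unfold Spec_getNormalizedNumberFromList; infer_instance

-- ===== CLAIM (what is proved, stated in full; the proofs are below) =====
def Claim_equal_getNormalizedNumberFromList : Prop := ∀ (number : List Int), Dom_getNormalizedNumberFromList number → Spec_getNormalizedNumberFromList number (getNormalizedNumberFromList number)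

-- ===== LEMMAS AND PROOFS =====

-- Least-significant-bit-first value of a list: the common characterisation of both ports.
def pvLsb : List Int → Int
  | [] => 0
  | b :: t => b + 2 * pvLsb t

theorem pvLsb_append_singleton (xs : List Int) (b : Int) :
    pvLsb (xs ++ [b]) = pvLsb xs + 2 ^ xs.length * b := by
  induction xs with
  | nil => simp [pvLsb]
  | cons x t ih => simp [pvLsb, ih]; ring

theorem pvA_eq_lsb (ys : List Int) :
    (PySem.List.pyRange 0 (ys.length : Int) 1).foldl
      (fun acc i => acc + 2 ^ i.toNat * PySem.List.pyGetD ys i 0) 0 = pvLsb ys := by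
  induction ys using List.reverseRecOn with
  | nil => simp [PySem.List.pyRange, pvLsb]
  | append_singleton xs b ih =>
    have hsplit : PySem.List.pyRange 0 ((xs ++ [b]).length : Int) 1 =
        PySem.List.pyRange 0 (xs.length : Int) 1 ++ [(xs.length : Int)] := by
      rw [show ((xs ++ [b]).length : Int) = (xs.length : Int) + 1 by simp]
      rw [PySem.List.pyRange_one_succ_right (Int.natCast_nonneg _)]
    rw [hsplit, List.foldl_append]
    have hcongr : (PySem.List.pyRange 0 (xs.length : Int) 1).foldl
        (fun acc i => acc + 2 ^ i.toNat * PySem.List.pyGetD (xs ++ [b]) i 0) 0 =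
        (PySem.List.pyRange 0 (xs.length : Int) 1).foldl
        (fun acc i => acc + 2 ^ i.toNat * PySem.List.pyGetD xs i 0) 0 := by
      apply PySem.List.foldl_congr_mem
      intro acc i hi
      rw [PySem.List.mem_pyRange_one] at hi
      rw [PySem.List.pyGetD_eq_getElem (xs ++ [b]) 0 hi.1 (by simp; omega),
          PySem.List.pyGetD_eq_getElem xs 0 hi.1 (by omega)]
      rw [List.getElem_append_left (by omega)]
    rw [hcongr, ih, pvLsb_append_singleton]
    simp only [List.foldl_cons, List.foldl_nil]
    rw [PySem.List.pyGetD_eq_getElem (xs ++ [b]) (i := (xs.length : Int)) 0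
          (Int.natCast_nonneg _) (by simp)]
    simp

theorem pvHorner_eq_lsb (ys : List Int) :
    ys.reverse.foldl (fun result bit => result * 2 + bit) 0 = pvLsb ys := by
  induction ys with
  | nil => simp [pvLsb]
  | cons b t ih =>
    simp only [List.reverse_cons, List.foldl_append, List.foldl_cons, List.foldl_nil, ih, pvLsb]
    ring

-- ===== VERDICT (by name: the statement is the Claim_ definition above) =====
theorem getNormalizedNumberFromList_spec : Claim_equal_getNormalizedNumberFromList := by
  intro number _
  unfold Spec_getNormalizedNumberFromList getNormalizedNumberFromList getNormalizedNumberFromList_alt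
  simp only []
  rw [pvHorner_eq_lsb number.reverse]
  rw [show (number.length : Int) - 1 + 1 = (number.reverse.length : Int) by simp]
  exact pvA_eq_lsb number.reverse
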